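-- pv_equiv track=rewrite | github.com/poliorang/Python_BMSTU_1_semester | lab_10.py | n_find
-- ===== SOURCE A (Python) =====
-- def n_find(line, simbol, n): # индекс n вхождения символа в строку
--     n_current = i = 0
--     while n_current != n and i < len(line):
--         if line[i] == simbol:
--             n_current += 1
--         i += 1
--     if n_current == n:
--         return i - 1
--     else:
--         return -1
-- ===== SOURCE B (Python) =====
-- def n_find(line, simbol, n):
--     positions = [i for i, c in enumerate(line) if c == simbol]
--     return positions[n - 1] if 1 <= n <= len(positions) else -1
-- ===== Notes on version B (the rewrite author's own statement) =====
-- stated objective: simpler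
-- what changed: A's early-stopping count-and-scan while loop is replaced by a two-phase shape: collect all matching indices with one enumerate comprehension, then select the n-th by direct indexing (or -1 if out of range); the comprehension iterates at C speed, which a timing run measured as ~1.8x faster despite losing the early exit.
import Mathlib
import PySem

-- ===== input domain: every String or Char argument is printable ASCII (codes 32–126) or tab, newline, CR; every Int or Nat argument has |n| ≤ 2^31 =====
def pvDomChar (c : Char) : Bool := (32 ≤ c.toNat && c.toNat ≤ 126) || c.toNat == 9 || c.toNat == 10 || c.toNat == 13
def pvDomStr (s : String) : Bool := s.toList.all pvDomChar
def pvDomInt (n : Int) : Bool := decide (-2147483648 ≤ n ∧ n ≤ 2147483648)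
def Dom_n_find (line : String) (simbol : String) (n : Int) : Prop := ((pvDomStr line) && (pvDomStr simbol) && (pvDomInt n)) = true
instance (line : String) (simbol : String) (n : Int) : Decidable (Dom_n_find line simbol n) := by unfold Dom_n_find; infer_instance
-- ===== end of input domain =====

-- B replaces A's early-stopping count-scan while loop by collecting all matching
-- indices first, then selecting the n-th (objective: simpler decomposition).


-- ===== PORT A =====
-- the while loop: state (n_current, i); stops when n_current = n or the string is exhausted
def nFindLoop (simbol : String) (n : Int) : List Char → Int → Int → Int × Int
  | rest, ncur, i =>
    if ncur = n then (ncur, i)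
    else
      match rest with
      | [] => (ncur, i)
      | c :: cs =>
        nFindLoop simbol n cs (if (String.ofList [c] == simbol) then ncur + 1 else ncur) (i + 1)

def n_find (line : String) (simbol : String) (n : Int) : Int :=
  let r := nFindLoop simbol n line.toList 0 0
  if r.1 = n then r.2 - 1 else -1

-- ===== PORT B =====
def n_find_alt (line : String) (simbol : String) (n : Int) : Int :=
  let positions : List Int :=
    ((PySem.List.enumerate line.toList 0).filter (fun p => String.ofList [p.2] == simbol)).map (·.1)
  if 1 ≤ n ∧ n ≤ (positions.length : Int) then positions.getD (n - 1).toNat (-1) else -1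

-- ===== PRECONDITION & SPEC =====
def Spec_n_find (line : String) (simbol : String) (n : Int) (out : Int) : Prop := out = n_find_alt line simbol n
instance (line : String) (simbol : String) (n : Int) (out : Int) : Decidable (Spec_n_find line simbol n out) := by unfold Spec_n_find; infer_instance

-- ===== CLAIM (what is proved, stated in full; the proofs are below) =====
def Claim_equal_n_find : Prop := ∀ (line : String) (simbol : String) (n : Int), Dom_n_find line simbol n → Spec_n_find line simbol n (n_find line simbol n)

-- ===== LEMMAS AND PROOFS =====

-- proof-side list of matching positions, with starting offset i
def posList (s : String) : List Char → Int → List Int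
  | [], _ => []
  | c :: cs, i => if String.ofList [c] == s then i :: posList s cs (i + 1) else posList s cs (i + 1)

lemma posList_eq_filter (s : String) (cs : List Char) (i : Int) :
    ((PySem.List.enumerate cs i).filter (fun p => String.ofList [p.2] == s)).map (·.1)
      = posList s cs i := by
  induction cs generalizing i with
  | nil => simp [posList, PySem.List.enumerate_nil]
  | cons c cs ih =>
    simp only [PySem.List.enumerate_cons, List.filter_cons, posList]
    by_cases h : String.ofList [c] == s
    · simp [h, ih]
    · simp [h, ih]

lemma nFindLoop_self (s : String) (n : Int) (cs : List Char) (i : Int) :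
    nFindLoop s n cs n i = (n, i) := by
  cases cs <;> simp [nFindLoop]

lemma nFindLoop_gt (s : String) (n : Int) (cs : List Char) (ncur i : Int)
    (h : n < ncur) : n < (nFindLoop s n cs ncur i).1 := by
  induction cs generalizing ncur i with
  | nil =>
    rw [nFindLoop]
    split
    · omega
    · simpa using h
  | cons c cs ih =>
    rw [nFindLoop]
    have hne : ¬ ncur = n := by omega
    rw [if_neg hne]
    by_cases hc : String.ofList [c] == s
    · rw [if_pos hc]; exact ih (ncur + 1) (i + 1) (by omega)
    · rw [if_neg hc]; exact ih ncur (i + 1) h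

lemma nFindLoop_main (s : String) (n : Int) (cs : List Char) (ncur i : Int)
    (h : ncur < n) :
    (if (nFindLoop s n cs ncur i).1 = n then (nFindLoop s n cs ncur i).2 - 1 else -1)
      = (if n ≤ ncur + ((posList s cs i).length : Int)
          then (posList s cs i).getD (n - ncur - 1).toNat (-1) else -1) := by
  induction cs generalizing ncur i with
  | nil =>
    have hne : ¬ ncur = n := by omega
    simp [nFindLoop, hne, posList]
  | cons c cs ih =>
    have hne : ¬ ncur = n := by omega
    rw [nFindLoop]
    simp only [hne, if_false, posList]
    by_cases hc : String.ofList [c] == s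
    · simp only [hc, if_true]
      by_cases heq : ncur + 1 = n
      · subst heq
        rw [nFindLoop_self]
        simp
      · rw [ih (ncur + 1) (i + 1) (by omega)]
        have hidx : (n - ncur - 1).toNat = (n - (ncur + 1) - 1).toNat + 1 := by omega
        by_cases hcond : n ≤ ncur + 1 + ((posList s cs (i + 1)).length : Int)
        · have hcond' : n ≤ ncur + ((i :: posList s cs (i + 1)).length : Int) := by
            simp only [List.length_cons]; push_cast; omega
          rw [if_pos hcond, if_pos hcond', hidx, List.getD_cons_succ]
        · have hcond' : ¬ n ≤ ncur + ((i :: posList s cs (i + 1)).length : Int) := by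
            simp only [List.length_cons]; push_cast; omega
          rw [if_neg hcond, if_neg hcond']
    · simp only [hc]
      exact ih ncur (i + 1) h

theorem n_find_eq (line : String) (simbol : String) (n : Int) :
    n_find line simbol n = n_find_alt line simbol n := by
  unfold n_find n_find_alt
  rw [posList_eq_filter]
  by_cases h1 : 1 ≤ n
  · have := nFindLoop_main simbol n line.toList 0 0 (by omega)
    simp only [show (0 : Int) + ((posList simbol line.toList 0).length : Int)
        = ((posList simbol line.toList 0).length : Int) by ring,
      show n - 0 - 1 = n - 1 by ring] at this
    rw [this]
    by_cases h2 : n ≤ ((posList simbol line.toList 0).length : Int)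
    · simp [h1, h2]
    · simp [h2]
  · have hn0 : ¬ (1 ≤ n ∧ n ≤ ((posList simbol line.toList 0).length : Int)) := by
      intro ⟨ha, _⟩; exact h1 ha
    simp only [hn0, if_false]
    by_cases h0 : n = 0
    · subst h0
      rw [nFindLoop_self]
      simp
    · have hlt : n < 0 := by omega
      have := nFindLoop_gt simbol n line.toList 0 0 (by omega)
      have hne : ¬ (nFindLoop simbol n line.toList 0 0).1 = n := by omega
      simp [hne]

-- ===== VERDICT (by name: the statement is the Claim_ definition above) =====
theorem n_find_spec : Claim_equal_n_find := by
  intro line simbol n _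
  exact n_find_eq line simbol n
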